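-- pv_equiv track=rewrite | github.com/hallucinate-llc/HACC | Invasion of Privacy Memorandum/engine/gym_sokoban_probe.py | _board_counts
-- ===== SOURCE A (Python) =====
-- from typing import Dict, List
--
-- def _board_counts(room_state) -> Dict[str, int]:
--     counts = {"walls": 0, "floor": 0, "targets": 0, "boxes_on_target": 0, "boxes": 0, "player": 0}
--     for row in room_state:
--         for cell in row:
--             value = int(cell)
--             if value == 0:
--                 counts["walls"] += 1
--             elif value == 1:
--                 counts["floor"] += 1
--             elif value == 2:
--                 counts["targets"] += 1
--             elif value == 3:
--                 counts["boxes_on_target"] += 1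
--             elif value == 4:
--                 counts["boxes"] += 1
--             elif value == 5:
--                 counts["player"] += 1
--     return counts
-- ===== SOURCE B (Python) =====
-- from typing import Dict
--
-- def _board_counts(room_state) -> Dict[str, int]:
--     rows = [[int(cell) for cell in row] for row in room_state]
--     names = ["walls", "floor", "targets", "boxes_on_target", "boxes", "player"]
--     return {name: sum(row.count(code) for row in rows)
--             for code, name in enumerate(names)}
-- ===== Notes on version B (the rewrite author's own statement) =====
-- stated objective: alternative
-- what changed: Replaces A's single pass with per-cell six-way if/elif dispatch by six staged counting passes: for each code 0-5 the result is the sum over rows of row.count(code), so no per-cell branching or mutable tally exists at all.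
import Mathlib
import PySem

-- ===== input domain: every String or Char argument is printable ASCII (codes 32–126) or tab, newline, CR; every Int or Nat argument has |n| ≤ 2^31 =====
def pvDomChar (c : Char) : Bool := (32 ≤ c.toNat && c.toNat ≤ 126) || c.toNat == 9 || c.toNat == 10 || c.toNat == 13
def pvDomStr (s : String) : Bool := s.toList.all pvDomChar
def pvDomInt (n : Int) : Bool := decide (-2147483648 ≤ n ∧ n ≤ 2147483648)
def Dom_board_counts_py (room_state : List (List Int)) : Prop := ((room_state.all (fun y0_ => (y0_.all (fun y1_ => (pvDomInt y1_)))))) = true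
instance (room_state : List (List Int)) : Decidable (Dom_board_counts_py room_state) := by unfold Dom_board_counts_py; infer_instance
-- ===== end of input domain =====

-- B replaces A's single pass with per-cell six-way if/elif dispatch by six staged counting passes (one row.count sweep per code); same result, no per-cell branching (alternative; same asymptotic cost).

-- ===== PORT A =====
-- per-cell body of A's nested loop: counts[<name>] += 1 (every key is always present, so modify's default 0 is never used)
def pvStepA (d : PySem.Dict String Int) (cell : Int) : PySem.Dict String Int :=
  let value := cell
  if value = 0 then d.modify "walls" 0 (· + 1)
  else if value = 1 then d.modify "floor" 0 (· + 1)
  else if value = 2 then d.modify "targets" 0 (· + 1)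
  else if value = 3 then d.modify "boxes_on_target" 0 (· + 1)
  else if value = 4 then d.modify "boxes" 0 (· + 1)
  else if value = 5 then d.modify "player" 0 (· + 1)
  else d

def board_counts_py (room_state : List (List Int)) : List (String × Int) :=
  let counts : PySem.Dict String Int :=
    PySem.Dict.ofList [("walls", 0), ("floor", 0), ("targets", 0), ("boxes_on_target", 0), ("boxes", 0), ("player", 0)]
  (room_state.foldl (fun d row => row.foldl pvStepA d) counts).items

-- ===== PORT B =====
-- B: rows = [[int(cell) for cell in row] for row in room_state]; then a dict comprehension
-- {name: sum(row.count(code) for row in rows) for code, name in enumerate(names)}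
def board_counts_py_alt (room_state : List (List Int)) : List (String × Int) :=
  let rows := room_state.map (fun row => row.map (fun cell => cell))
  let names : List String := ["walls", "floor", "targets", "boxes_on_target", "boxes", "player"]
  (PySem.Dict.ofList
    ((PySem.List.enumerate names).map (fun cn =>
      (cn.2, rows.foldl (fun acc row => acc + (PySem.List.count row cn.1 : Int)) 0)))).items

-- ===== PRECONDITION & SPEC =====
def Spec_board_counts_py (room_state : List (List Int)) (out : List (String × Int)) : Prop := out = board_counts_py_alt room_state
instance (room_state : List (List Int)) (out : List (String × Int)) : Decidable (Spec_board_counts_py room_state out) := by unfold Spec_board_counts_py; infer_instance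

-- ===== CLAIM (what is proved, stated in full; the proofs are below) =====
def Claim_equal_board_counts_py : Prop := ∀ (room_state : List (List Int)), Dom_board_counts_py room_state → Spec_board_counts_py room_state (board_counts_py room_state)

-- ===== LEMMAS AND PROOFS =====

-- one += step on the fixed six-key dict, computed once per key
theorem pvMod_walls (w f t bt b p : Int) :
    (PySem.Dict.ofList [("walls", w), ("floor", f), ("targets", t), ("boxes_on_target", bt), ("boxes", b), ("player", p)]).modify "walls" 0 (· + 1) = PySem.Dict.ofList [("walls", w + 1), ("floor", f), ("targets", t), ("boxes_on_target", bt), ("boxes", b), ("player", p)] := by rfl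

theorem pvMod_floor (w f t bt b p : Int) :
    (PySem.Dict.ofList [("walls", w), ("floor", f), ("targets", t), ("boxes_on_target", bt), ("boxes", b), ("player", p)]).modify "floor" 0 (· + 1) = PySem.Dict.ofList [("walls", w), ("floor", f + 1), ("targets", t), ("boxes_on_target", bt), ("boxes", b), ("player", p)] := by rfl

theorem pvMod_targets (w f t bt b p : Int) :
    (PySem.Dict.ofList [("walls", w), ("floor", f), ("targets", t), ("boxes_on_target", bt), ("boxes", b), ("player", p)]).modify "targets" 0 (· + 1) = PySem.Dict.ofList [("walls", w), ("floor", f), ("targets", t + 1), ("boxes_on_target", bt), ("boxes", b), ("player", p)] := by rfl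

theorem pvMod_boxes_on_target (w f t bt b p : Int) :
    (PySem.Dict.ofList [("walls", w), ("floor", f), ("targets", t), ("boxes_on_target", bt), ("boxes", b), ("player", p)]).modify "boxes_on_target" 0 (· + 1) = PySem.Dict.ofList [("walls", w), ("floor", f), ("targets", t), ("boxes_on_target", bt + 1), ("boxes", b), ("player", p)] := by rfl

theorem pvMod_boxes (w f t bt b p : Int) :
    (PySem.Dict.ofList [("walls", w), ("floor", f), ("targets", t), ("boxes_on_target", bt), ("boxes", b), ("player", p)]).modify "boxes" 0 (· + 1) = PySem.Dict.ofList [("walls", w), ("floor", f), ("targets", t), ("boxes_on_target", bt), ("boxes", b + 1), ("player", p)] := by rfl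

theorem pvMod_player (w f t bt b p : Int) :
    (PySem.Dict.ofList [("walls", w), ("floor", f), ("targets", t), ("boxes_on_target", bt), ("boxes", b), ("player", p)]).modify "player" 0 (· + 1) = PySem.Dict.ofList [("walls", w), ("floor", f), ("targets", t), ("boxes_on_target", bt), ("boxes", b), ("player", p + 1)] := by rfl

-- invariant of A's cell loop: the fixed-shape dict accumulates one List.count per code
theorem pvFoldA (cells : List Int) (w f t bt b p : Int) :
    cells.foldl pvStepA
      (PySem.Dict.ofList [("walls", w), ("floor", f), ("targets", t), ("boxes_on_target", bt), ("boxes", b), ("player", p)]) =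
    PySem.Dict.ofList [("walls", w + cells.count 0), ("floor", f + cells.count 1), ("targets", t + cells.count 2),
      ("boxes_on_target", bt + cells.count 3), ("boxes", b + cells.count 4), ("player", p + cells.count 5)] := by
  induction cells generalizing w f t bt b p with
  | nil => simp
  | cons c rest ih =>
    simp only [List.foldl_cons, pvStepA]
    split_ifs with h0 h1 h2 h3 h4 h5 <;>
      [rw [pvMod_walls]; rw [pvMod_floor]; rw [pvMod_targets]; rw [pvMod_boxes_on_target];
       rw [pvMod_boxes]; rw [pvMod_player]; skip] <;>
      rw [ih] <;> congr 1 <;> simp_all [List.count_cons] <;> push_cast <;> ring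

-- B's staged pass: summing row.count(v) over the rows counts v in the flattened board
theorem pvSumCount (rows : List (List Int)) (v : Int) (a : Int) :
    rows.foldl (fun acc row => acc + (List.count v row : Int)) a = a + (List.count v rows.flatten : Int) := by
  induction rows generalizing a with
  | nil => simp
  | cons r rest ih => simp [ih, List.count_append]; push_cast; ring

-- ===== VERDICT (by name: the statement is the Claim_ definition above) =====
theorem board_counts_py_spec : Claim_equal_board_counts_py := by
  intro rs _
  show board_counts_py rs = board_counts_py_alt rs
  simp only [board_counts_py, board_counts_py_alt]
  rw [← List.foldl_flatten, pvFoldA]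
  simp [PySem.List.enumerate, PySem.List.count, pvSumCount, List.map_id']
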